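-- pv_equiv track=rewrite | github.com/AP-MI-2021/lab-2-alextopan2341 | main.py | get_leap_years
-- ===== SOURCE A (Python) =====
-- def get_leap_years(start: int, end: int):
--     '''
--     Determinam anii bisecti intr-un interval inchis dat
--     :param start: prima valoare din interval
--     :param end: ultima valoare din interval
--     :return: lista tuturor anilor bisecti
--     '''
--     li = []
--     if start % 4 == 0:
--         first = start
--     elif (start+1) % 4 == 0:
--         first = start+1
--     elif (start+2) % 4 == 0:
--         first = start+2
--     elif (start + 3) % 4 == 0:
--         first = start + 3
--     while first <= end :
--         li.append(first)
--         first += 4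
--     return li
-- ===== SOURCE B (Python) =====
-- def get_leap_years(start: int, end: int):
--     return [year for year in range(start, end + 1) if year % 4 == 0]
-- ===== Notes on version B (the rewrite author's own statement) =====
-- stated objective: simpler
-- what changed: Instead of searching for the first multiple of 4 and stepping by 4, B scans every integer in the closed interval once and filters those divisible by 4 in a single comprehension.
import Mathlib
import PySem

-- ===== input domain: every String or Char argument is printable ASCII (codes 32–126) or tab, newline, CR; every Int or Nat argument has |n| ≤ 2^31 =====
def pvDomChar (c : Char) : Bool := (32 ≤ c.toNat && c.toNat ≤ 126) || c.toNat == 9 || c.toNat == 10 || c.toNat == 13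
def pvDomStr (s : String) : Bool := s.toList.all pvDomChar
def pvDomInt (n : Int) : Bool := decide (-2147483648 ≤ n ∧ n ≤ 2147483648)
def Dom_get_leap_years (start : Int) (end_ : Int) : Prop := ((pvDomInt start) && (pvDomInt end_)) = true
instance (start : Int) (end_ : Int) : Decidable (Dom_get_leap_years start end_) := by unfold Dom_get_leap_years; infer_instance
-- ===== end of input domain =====

-- B replaces A's search-for-first-multiple-then-step-by-4 generation with a single
-- filtering scan of the whole closed interval (simpler; scans every year once).

-- ===== PORT A =====
-- the while loop: append first, step by 4, while first <= end
def getLeapLoop (first : Int) (end_ : Int) : List Int :=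
  if first ≤ end_ then first :: getLeapLoop (first + 4) end_ else []
termination_by (end_ + 1 - first).toNat
decreasing_by omega

def get_leap_years (start : Int) (end_ : Int) : List Int :=
  let first :=
    if PySem.Int.mod start 4 = 0 then start
    else if PySem.Int.mod (start + 1) 4 = 0 then start + 1
    else if PySem.Int.mod (start + 2) 4 = 0 then start + 2
    else if PySem.Int.mod (start + 3) 4 = 0 then start + 3
    else start  -- unreachable: one of the four branches always fires
  getLeapLoop first end_

-- ===== PORT B =====
def get_leap_years_alt (start : Int) (end_ : Int) : List Int :=
  (PySem.List.pyRange start (end_ + 1) 1).filter (fun year => PySem.Int.mod year 4 == 0)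

-- ===== PRECONDITION & SPEC =====
def Spec_get_leap_years (start : Int) (end_ : Int) (out : List Int) : Prop := out = get_leap_years_alt start end_
instance (start : Int) (end_ : Int) (out : List Int) : Decidable (Spec_get_leap_years start end_ out) := by unfold Spec_get_leap_years; infer_instance

-- ===== CLAIM (what is proved, stated in full; the proofs are below) =====
def Claim_equal_get_leap_years : Prop := ∀ (start : Int) (end_ : Int), Dom_get_leap_years start end_ → Spec_get_leap_years start end_ (get_leap_years start end_)

-- ===== LEMMAS AND PROOFS =====

-- F s = smallest multiple of 4 that is ≥ s
def pvFirst (s : Int) : Int := s + PySem.Int.mod (-s) 4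

theorem pvFirst_spec (s : Int) : s ≤ pvFirst s ∧ pvFirst s < s + 4 ∧ pvFirst s % 4 = 0 := by
  unfold pvFirst
  rw [PySem.Int.mod_eq_emod_of_pos (b := 4) (by norm_num)]
  omega

theorem first_eq (start : Int) :
    (if PySem.Int.mod start 4 = 0 then start
     else if PySem.Int.mod (start + 1) 4 = 0 then start + 1
     else if PySem.Int.mod (start + 2) 4 = 0 then start + 2
     else if PySem.Int.mod (start + 3) 4 = 0 then start + 3
     else start) = pvFirst start := by
  unfold pvFirst
  simp only [PySem.Int.mod_eq_emod_of_pos (b := 4) (by norm_num)]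
  split_ifs <;> omega

-- the filtering scan produces exactly A's stepped sequence from the first multiple
theorem filter_eq_loop (s e : Int) :
    (PySem.List.pyRange s (e + 1) 1).filter (fun year => PySem.Int.mod year 4 == 0)
      = getLeapLoop (pvFirst s) e := by
  by_cases hs : s ≤ e
  · obtain ⟨h1, h2, h3⟩ := pvFirst_spec s
    rw [PySem.List.pyRange_one_cons (by omega)]
    by_cases h4 : s % 4 = 0
    · have hF : pvFirst s = s := by
        unfold pvFirst
        rw [PySem.Int.mod_eq_emod_of_pos (b := 4) (by norm_num)]; omega
      have hF1 : pvFirst (s + 1) = s + 4 := by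
        unfold pvFirst
        rw [PySem.Int.mod_eq_emod_of_pos (b := 4) (by norm_num)]; omega
      rw [List.filter_cons_of_pos
            (by rw [show PySem.Int.mod s 4 = s % 4 from PySem.Int.mod_eq_emod_of_pos (by norm_num)]; simp [h4]),
          filter_eq_loop (s + 1) e, hF1, hF]
      conv_rhs => rw [getLeapLoop]
      rw [if_pos hs]
    · have hF1 : pvFirst (s + 1) = pvFirst s := by
        unfold pvFirst
        rw [PySem.Int.mod_eq_emod_of_pos (b := 4) (by norm_num),
            PySem.Int.mod_eq_emod_of_pos (b := 4) (by norm_num)]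
        omega
      rw [List.filter_cons_of_neg
            (by rw [show PySem.Int.mod s 4 = s % 4 from PySem.Int.mod_eq_emod_of_pos (by norm_num)]; simp [h4]),
          filter_eq_loop (s + 1) e, hF1]
  · obtain ⟨h1, _, _⟩ := pvFirst_spec s
    rw [getLeapLoop, if_neg (by omega)]
    have : PySem.List.pyRange s (e + 1) 1 = [] := by
      rw [PySem.List.pyRange_one]
      simp
      omega
    rw [this, List.filter_nil]
termination_by (e + 1 - s).toNat
decreasing_by all_goals omega

-- ===== VERDICT (by name: the statement is the Claim_ definition above) =====
theorem get_leap_years_spec : Claim_equal_get_leap_years := by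
  intro start end_ _
  unfold Spec_get_leap_years get_leap_years get_leap_years_alt
  rw [first_eq, filter_eq_loop]
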